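-- pv_equiv track=rewrite | github.com/serenahuang225/agent-intent-drift | agents/baseline_agent.py | _collapse_repetition
-- ===== SOURCE A (Python) =====
-- def _collapse_repetition(text: str, max_repeat: int = 2) -> str:
--     """Collapse same-sentence repetition (e.g. 'X. X. X.' -> 'X. X.')."""
--     if not text or len(text) < 20:
--         return text
--     parts = text.replace("\n", " ").split(".")
--     sentences = [s.strip() for s in parts if s.strip()]
--     if len(sentences) < 3:
--         return text
--     out = []
--     prev, count = None, 0
--     for s in sentences:
--         if s == prev:
--             count += 1
--             if count <= max_repeat:
--                 out.append(s)
--         else: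
--             prev, count = s, 1
--             out.append(s)
--     result = ". ".join(out)
--     if result and not result.endswith("."):
--         result += "."
--     return result
-- ===== SOURCE B (Python) =====
-- def _runs(ss):
--     """Split ss into maximal runs of consecutive equal sentences."""
--     if not ss:
--         return []
--     s = ss[0]
--     k = 1
--     while k < len(ss) and ss[k] == s:
--         k += 1
--     return [ss[:k]] + _runs(ss[k:])
--
--
-- def _collapse_repetition(text: str, max_repeat: int = 2) -> str:
--     """Collapse same-sentence repetition (e.g. 'X. X. X.' -> 'X. X.')."""
--     if not text or len(text) < 20:
--         return text
--     parts = text.replace("\n", " ").split(".")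
--     sentences = [s.strip() for s in parts if s.strip()]
--     if len(sentences) < 3:
--         return text
--     keep = max(1, max_repeat)
--     out = [s for run in _runs(sentences) for s in run[:keep]]
--     result = ". ".join(out)
--     if result and not result.endswith("."):
--         result += "."
--     return result
-- ===== Notes on version B (the rewrite author's own statement) =====
-- stated objective: alternative
-- what changed: A's prev/count accumulator loop is replaced by splitting the sentence list into maximal runs of consecutive equal sentences (recursive two-pointer run scanner) and keeping the first max(1, max_repeat) items of each run.
import Mathlib
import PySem

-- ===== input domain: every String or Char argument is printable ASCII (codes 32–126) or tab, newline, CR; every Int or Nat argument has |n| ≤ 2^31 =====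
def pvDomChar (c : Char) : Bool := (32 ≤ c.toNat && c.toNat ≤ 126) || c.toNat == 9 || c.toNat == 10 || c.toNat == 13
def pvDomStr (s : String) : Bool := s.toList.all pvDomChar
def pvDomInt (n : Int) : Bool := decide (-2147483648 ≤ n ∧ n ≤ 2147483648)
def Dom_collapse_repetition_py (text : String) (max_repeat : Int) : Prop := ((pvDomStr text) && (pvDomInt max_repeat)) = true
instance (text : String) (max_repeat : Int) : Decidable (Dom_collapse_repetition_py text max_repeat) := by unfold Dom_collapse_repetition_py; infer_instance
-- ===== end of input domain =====

-- B replaces A's prev/count accumulator loop by splitting the sentence list into maximal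
-- runs of consecutive equal sentences and keeping the first max(1, max_repeat) of each run
-- (objective: alternative decomposition, same cost).

-- ===== PORT A =====

-- the body of A's 'for s in sentences' loop, state = (out, prev, count)
def pvStepA (max_repeat : Int) (st : List String × Option String × Int) (s : String) :
    List String × Option String × Int :=
  match st with
  | (out, prev, count) =>
    if some s = prev then
      let count := count + 1
      if count ≤ max_repeat then (out ++ [s], prev, count) else (out, prev, count)
    else (out ++ [s], some s, 1)

def collapse_repetition_py (text : String) (max_repeat : Int) : String :=
  if text = "" ∨ PySem.Str.len text < 20 then text
  else
    let parts := (PySem.Str.split? (PySem.Str.replace text "\n" " ") ".").getD []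
    let sentences := (parts.map PySem.Str.strip).filter (fun t => t ≠ "")
    if sentences.length < 3 then text
    else
      let st := sentences.foldl (pvStepA max_repeat) ([], none, 0)
      let result := PySem.Str.join ". " st.1
      if result ≠ "" ∧ PySem.Str.endswith result "." = false then result ++ "." else result

-- ===== PORT B =====

-- Source B's _runs: maximal runs of consecutive equal sentences (ss[:k] / ss[k:])
def pvRuns (ss : List String) : List (List String) :=
  match ss with
  | [] => []
  | s :: rest => (s :: rest.takeWhile (· == s)) :: pvRuns (rest.dropWhile (· == s))
termination_by ss.length
decreasing_by
  simp only [List.length_cons]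
  exact Nat.lt_succ_of_le (List.length_dropWhile_le _ _)

def collapse_repetition_py_alt (text : String) (max_repeat : Int) : String :=
  if text = "" ∨ PySem.Str.len text < 20 then text
  else
    let parts := (PySem.Str.split? (PySem.Str.replace text "\n" " ") ".").getD []
    let sentences := (parts.map PySem.Str.strip).filter (fun t => t ≠ "")
    if sentences.length < 3 then text
    else
      let keep := (max 1 max_repeat).toNat
      let out := (pvRuns sentences).flatMap (fun run => run.take keep)
      let result := PySem.Str.join ". " out
      if result ≠ "" ∧ PySem.Str.endswith result "." = false then result ++ "." else result

-- ===== PRECONDITION & SPEC =====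
def Spec_collapse_repetition_py (text : String) (max_repeat : Int) (out : String) : Prop := out = collapse_repetition_py_alt text max_repeat
instance (text : String) (max_repeat : Int) (out : String) : Decidable (Spec_collapse_repetition_py text max_repeat out) := by unfold Spec_collapse_repetition_py; infer_instance

-- ===== CLAIM (what is proved, stated in full; the proofs are below) =====
def Claim_equal_collapse_repetition_py : Prop := ∀ (text : String) (max_repeat : Int), Dom_collapse_repetition_py text max_repeat → Spec_collapse_repetition_py text max_repeat (collapse_repetition_py text max_repeat)

-- ===== LEMMAS AND PROOFS =====

-- A's loop over a block of sentences all equal to prev = s, starting at count c ≥ 1: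
-- it appends exactly the first (max_repeat - c) of them.
theorem pvLoopA_run (m : Int) (s : String) (ts : List String) (hts : ∀ t ∈ ts, t = s) :
    ∀ (out : List String) (c : Int),
      ts.foldl (pvStepA m) (out, some s, c)
        = (out ++ ts.take (m - c).toNat, some s, c + ts.length) := by
  induction ts with
  | nil => intro out c; simp
  | cons t ts ih =>
    intro out c
    have ht : t = s := hts t (by simp)
    have hts' : ∀ t ∈ ts, t = s := fun x hx => hts x (by simp [hx])
    subst ht
    simp only [List.foldl_cons, pvStepA, if_true]
    by_cases hc : c + 1 ≤ m
    · rw [if_pos hc, ih hts']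
      have h1 : (m - c).toNat = (m - (c + 1)).toNat + 1 := by omega
      simp [h1, List.take_succ_cons]
      omega
    · rw [if_neg hc, ih hts']
      have h0 : (m - c).toNat = 0 := by omega
      have h0' : (m - (c + 1)).toNat = 0 := by omega
      simp [h0, h0']
      omega

theorem pvLoopA_runs (m : Int) (ss : List String) :
    ∀ (out : List String) (p : Option String) (c : Int),
      (∀ h, ss.head? = some h → p ≠ some h) →
      (ss.foldl (pvStepA m) (out, p, c)).1
        = out ++ (pvRuns ss).flatMap (fun run => run.take (max 1 m).toNat) := by
  induction ss using pvRuns.induct with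
  | case1 => intro out p c _; simp [pvRuns]
  | case2 s rest ih =>
    intro out p c hp
    have hps : p ≠ some s := hp s rfl
    rw [← List.takeWhile_append_dropWhile (p := (· == s)) (l := rest)]
    simp only [List.foldl_cons, List.foldl_append, pvStepA]
    rw [if_neg (fun h => hps h.symm)]
    have hall : ∀ t ∈ rest.takeWhile (· == s), t = s := by
      intro t ht
      have := List.mem_takeWhile_imp ht
      simpa using this
    rw [pvLoopA_run m s _ hall]
    rw [ih _ _ _ ?_]
    · rw [pvRuns]
      have hkeep : (max 1 m).toNat = (m - 1).toNat + 1 := by omega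
      simp [hkeep, List.take_succ_cons, List.append_assoc]
    · intro h hh heq
      cases heq
      have := List.head?_dropWhile_not (· == s) rest
      rw [hh] at this
      simp at this

-- ===== VERDICT (by name: the statement is the Claim_ definition above) =====
theorem collapse_repetition_py_spec : Claim_equal_collapse_repetition_py := by
  intro text max_repeat _
  unfold Spec_collapse_repetition_py collapse_repetition_py collapse_repetition_py_alt
  dsimp only
  by_cases h1 : text = "" ∨ PySem.Str.len text < 20
  · rw [if_pos h1, if_pos h1]
  · rw [if_neg h1, if_neg h1]
    by_cases h2 : ((((PySem.Str.split? (PySem.Str.replace text "\n" " ") ".").getD []).map PySem.Str.strip).filter (fun t => t ≠ "")).length < 3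
    · rw [if_pos h2, if_pos h2]
    · rw [if_neg h2, if_neg h2]
      rw [pvLoopA_runs max_repeat _ [] none 0 (fun h _ => by simp), List.nil_append]
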